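-- pv_equiv track=rewrite | github.com/tejavathvaishnavi23-svg/code-everyday | max_consecutive_ones.py | sum_except
-- ===== SOURCE A (Python) =====
-- def sum_except(matrix):
--     m = len(matrix)
--     n = len(matrix[0])
--     result = [[1] * n for i in range(m)]
--     for i in range(m):
--         # left pass:sum of all elements to the left
--         left = 0
--         for j in range(n):
--             result[i][j] = left
--             left += matrix[i][j]
--         # right pass: add sum of all elements to the right
--         right = 0
--         for j in range(n-1, -1, -1):
--             result[i][j] = right
--             right += matrix[i][j]
--     return result
-- ===== SOURCE B (Python) =====
-- def sum_except(matrix):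
--     n = len(matrix[0])
--     result = []
--     for row in matrix:
--         total = sum(row[:n])
--         running = 0
--         out_row = []
--         for j in range(n):
--             running += row[j]
--             out_row.append(total - running)
--         result.append(out_row)
--     return result
-- ===== Notes on version B (the rewrite author's own statement) =====
-- stated objective: simpler
-- what changed: Drops A's dead left pass and in-place index mutation: B sums each row once and does a single forward sweep emitting total minus a running prefix sum, instead of A's preallocated result mutated by a left pass (overwritten) and a backward right pass.
import Mathlib
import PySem

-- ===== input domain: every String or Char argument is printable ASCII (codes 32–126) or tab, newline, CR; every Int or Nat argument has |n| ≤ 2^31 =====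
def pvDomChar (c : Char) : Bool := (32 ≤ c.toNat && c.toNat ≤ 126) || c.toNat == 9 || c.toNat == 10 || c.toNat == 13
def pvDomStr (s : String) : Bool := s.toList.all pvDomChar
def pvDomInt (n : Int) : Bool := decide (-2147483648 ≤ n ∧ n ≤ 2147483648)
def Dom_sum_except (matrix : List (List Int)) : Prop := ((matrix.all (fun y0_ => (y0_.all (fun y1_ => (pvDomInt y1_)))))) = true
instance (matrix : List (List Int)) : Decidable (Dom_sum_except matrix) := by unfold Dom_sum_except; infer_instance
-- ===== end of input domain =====

-- B replaces A's dead left pass and backward mutating right pass by one forward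
-- total-minus-prefix sweep per row (simpler, one pass instead of two, no index mutation).

-- ===== PORT A =====
-- result[i][j] = v  (j is always a nonnegative in-range loop index here)
def pvSetIdx (l : List Int) (j : Int) (v : Int) : List Int := l.set j.toNat v

-- the shared body of A's two inner loops: result[i][j] = acc; acc += matrix[i][j]
def pvStepA (row : List Int) (st : Int × List Int) (j : Int) : Int × List Int :=
  (st.1 + PySem.List.pyGetD row j 0, pvSetIdx st.2 j st.1)

-- one iteration of A's outer loop (row i): left pass over range(n), then right pass over range(n-1,-1,-1)
def pvRowA (row : List Int) (n : Int) : List Int :=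
  let resL := ((PySem.List.pyRange 0 n 1).foldl (pvStepA row) ((0 : Int), List.replicate n.toNat 1)).2
  ((PySem.List.pyRange (n - 1) (-1) (-1)).foldl (pvStepA row) ((0 : Int), resL)).2

def sum_except (matrix : List (List Int)) : List (List Int) :=
  let m : Int := (matrix.length : Int)
  let n : Int := ((PySem.List.pyGetD matrix 0 ([] : List Int)).length : Int)
  (PySem.List.pyRange 0 m 1).map (fun i => pvRowA (PySem.List.pyGetD matrix i ([] : List Int)) n)

-- ===== PORT B =====
-- B's inner loop body: running += row[j]; out_row.append(total - running)
def pvStepB (row : List Int) (total : Int) (st : Int × List Int) (j : Int) : Int × List Int :=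
  (st.1 + PySem.List.pyGetD row j 0, st.2 ++ [total - (st.1 + PySem.List.pyGetD row j 0)])

-- B's per-row work: total = sum(row[:n]); forward sweep over range(n)
def pvRowB (row : List Int) (n : Int) : List Int :=
  let total := (PySem.List.slice row (some 0) (some n)).sum
  ((PySem.List.pyRange 0 n 1).foldl (pvStepB row total) ((0 : Int), ([] : List Int))).2

def sum_except_alt (matrix : List (List Int)) : List (List Int) :=
  let n : Int := ((PySem.List.pyGetD matrix 0 ([] : List Int)).length : Int)
  matrix.map (fun row => pvRowB row n)

-- ===== PRECONDITION & SPEC =====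
-- A raises IndexError on an empty matrix (matrix[0]) and whenever some row is shorter
-- than the first row (matrix[i][j] for j < n); exactly those inputs are excluded.
def Pre_sum_except (matrix : List (List Int)) : Prop :=
  matrix ≠ [] ∧ ∀ row ∈ matrix, (PySem.List.pyGetD matrix 0 ([] : List Int)).length ≤ row.length
instance (matrix : List (List Int)) : Decidable (Pre_sum_except matrix) := by
  unfold Pre_sum_except; infer_instance

def pvWitness_sum_except : List (List Int) := [[1, 2, 3], [4, -5, 6]]

def Spec_sum_except (matrix : List (List Int)) (out : List (List Int)) : Prop := out = sum_except_alt matrix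
instance (matrix : List (List Int)) (out : List (List Int)) : Decidable (Spec_sum_except matrix out) := by unfold Spec_sum_except; infer_instance

-- ===== CLAIM (what is proved, stated in full; the proofs are below) =====
def Claim_equal_sum_except : Prop := ∀ (matrix : List (List Int)), Dom_sum_except matrix → Pre_sum_except matrix → Spec_sum_except matrix (sum_except matrix)

-- ===== LEMMAS AND PROOFS =====

-- reference value: strict right-suffix sums of l, each shifted by r
def susR : List Int → Int → List Int
  | [], _ => []
  | _ :: l, r => (l.sum + r) :: susR l r

theorem susR_append_singleton (l : List Int) (a r : Int) :
    susR (l ++ [a]) r = susR l (a + r) ++ [r] := by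
  induction l with
  | nil => simp [susR]
  | cons b l ih => simp [susR, ih, List.sum_append]; ring

-- A's left pass only overwrites entries: the length of the result list is unchanged
theorem leftPass_length (row : List Int) (js : List Int) :
    ∀ (acc : Int) (res : List Int),
      ((js.foldl (pvStepA row) (acc, res)).2).length = res.length := by
  induction js with
  | nil => intro acc res; simp
  | cons j js ih => intro acc res; simp [pvStepA, pvSetIdx, ih]

-- A's right pass over range(M-1,-1,-1) rewrites positions 0..M-1 with suffix sums
theorem rightPass (row : List Int) :
    ∀ (M : Nat) (right : Int) (res : List Int), M ≤ row.length → M ≤ res.length →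
      ((PySem.List.pyRange ((M : Int) - 1) (-1) (-1)).foldl (pvStepA row) (right, res)).2
        = susR (row.take M) right ++ res.drop M := by
  intro M
  induction M with
  | zero =>
      intro right res _ _
      rw [PySem.List.pyRange_neg_one_eq_nil (by omega)]
      simp [susR]
  | succ M ih =>
      intro right res hrow hres
      have hM : M < row.length := by omega
      have hMr : M < res.length := by omega
      have hcast : (((M + 1 : Nat) : Int) - 1 : Int) = (M : Int) := by push_cast; ring
      rw [hcast, PySem.List.pyRange_neg_one_cons (by omega)]
      have hstep : pvStepA row (right, res) (M : Int)
          = (right + row[M], res.set M right) := by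
        simp [pvStepA, pvSetIdx, PySem.List.pyGetD_natCast, hM]
      rw [List.foldl_cons, hstep]
      rw [ih (right + row[M]) (res.set M right) (by omega) (by simp; omega)]
      have htake : row.take (M + 1) = row.take M ++ [row[M]] := by
        rw [List.take_add_one]; simp [List.getElem?_eq_getElem hM]
      rw [htake, susR_append_singleton]
      have hdrop : (res.set M right).drop M = right :: res.drop (M + 1) := by
        rw [List.drop_eq_getElem_cons (by simpa using hMr)]
        simp [List.drop_set]
      rw [hdrop]
      simp [add_comm]

-- B's forward sweep over range(M) computes the running prefix sum and the suffix values
theorem bPass (row : List Int) (total : Int) :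
    ∀ (M : Nat), M ≤ row.length →
      ((PySem.List.pyRange 0 (M : Int) 1).foldl (pvStepB row total) ((0 : Int), ([] : List Int)))
        = ((row.take M).sum, susR (row.take M) (total - (row.take M).sum)) := by
  intro M
  induction M with
  | zero => simp [PySem.List.pyRange_one_eq_nil, susR]
  | succ M ih =>
      intro hrow
      have hM : M < row.length := by omega
      have hrng : PySem.List.pyRange 0 ((M : Int) + 1) 1
          = PySem.List.pyRange 0 (M : Int) 1 ++ [(M : Int)] := by
        exact PySem.List.pyRange_one_succ_right (by omega)
      rw [show ((M + 1 : Nat) : Int) = (M : Int) + 1 by push_cast; ring, hrng,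
        List.foldl_append, ih (by omega)]
      have htake : row.take (M + 1) = row.take M ++ [row[M]] := by
        rw [List.take_add_one]; simp [List.getElem?_eq_getElem hM]
      have hget : PySem.List.pyGetD row (M : Int) 0 = row[M] := by
        simp [PySem.List.pyGetD_natCast, hM]
      simp only [List.foldl_cons, List.foldl_nil, pvStepB, hget, htake,
        susR_append_singleton, List.sum_append, List.sum_cons, List.sum_nil, Prod.mk.injEq]
      refine ⟨by ring, ?_⟩
      have h1 : total - (List.take M row).sum
          = row[M] + (total - ((List.take M row).sum + (row[M] + 0))) := by ring
      have h2 : total - ((List.take M row).sum + row[M])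
          = total - ((List.take M row).sum + (row[M] + 0)) := by ring
      rw [h1, h2]

-- per-row agreement: A's row result equals B's row result
theorem row_eq (row : List Int) (N : Nat) (h : N ≤ row.length) :
    pvRowA row (N : Int) = pvRowB row (N : Int) := by
  have hB : pvRowB row (N : Int) = susR (row.take N) 0 := by
    show ((PySem.List.pyRange 0 (N : Int) 1).foldl
        (pvStepB row ((PySem.List.slice row (some 0) (some (N : Int))).sum))
        ((0 : Int), ([] : List Int))).2 = susR (row.take N) 0
    rw [bPass row _ N h]
    simp [PySem.List.slice_to_natCast]
  have lenL : ((((PySem.List.pyRange 0 (N : Int) 1).foldl (pvStepA row)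
      ((0 : Int), List.replicate (N : Int).toNat 1)).2)).length = N := by
    rw [leftPass_length]; simp
  have hA : pvRowA row (N : Int) = susR (row.take N) 0 := by
    unfold pvRowA
    rw [show ((N : Int) - 1 : Int) = (N : Int) - 1 by ring]
    rw [rightPass row N 0 _ h (by rw [lenL])]
    rw [List.drop_eq_nil_of_le (by rw [lenL])]
    simp
  rw [hA, hB]

-- ===== VERDICT (by name: the statement is the Claim_ definition above) =====
theorem sum_except_spec : Claim_equal_sum_except := by
  intro matrix _ hpre
  obtain ⟨hne, hlen⟩ := hpre
  unfold Spec_sum_except sum_except sum_except_alt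
  have hmap : (PySem.List.pyRange 0 (matrix.length : Int) 1).map
        (fun i => pvRowA (PySem.List.pyGetD matrix i ([] : List Int))
          ((PySem.List.pyGetD matrix 0 ([] : List Int)).length : Int))
      = matrix.map (fun row => pvRowA row
          ((PySem.List.pyGetD matrix 0 ([] : List Int)).length : Int)) := by
    rw [show (fun i => pvRowA (PySem.List.pyGetD matrix i ([] : List Int))
          ((PySem.List.pyGetD matrix 0 ([] : List Int)).length : Int))
        = (fun row => pvRowA row ((PySem.List.pyGetD matrix 0 ([] : List Int)).length : Int))
            ∘ (fun i => PySem.List.pyGetD matrix i ([] : List Int)) from rfl]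
    rw [← List.map_map, PySem.List.map_pyGetD_pyRange_zero']
  simp only [hmap]
  exact List.map_congr_left (fun row hrow => row_eq row _ (hlen row hrow))
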